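-- pv_equiv track=rewrite | github.com/bryanfpp/BFP-Verano-2024-T1 | CodeBase7/fre.py | contar_nombres_unicos
-- ===== SOURCE A (Python) =====
-- def contar_nombres_unicos(mi_arreglo):
--     """
--     Recibe un arreglo de nombres y devuelve dos arreglos:
--     uno con los nombres únicos y otro con sus frecuencias.
--     """
--     frecuencia = {}
--
--     # Recorrer el arreglo de nombres
--     for nombre in mi_arreglo:
--         # Si el nombre ya está en el diccionario, incrementar su frecuencia
--         if nombre in frecuencia:
--             frecuencia[nombre] += 1
--         # Si el nombre no está en el diccionario, agregarlo con frecuencia 1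
--         else:
--             frecuencia[nombre] = 1
--
--     # Crear dos listas separadas: una de nombres y otra de frecuencias
--     nombres_unicos = list(frecuencia.keys())
--     frecuencias = list(frecuencia.values())
--
--     return nombres_unicos, frecuencias
-- ===== SOURCE B (Python) =====
-- def contar_nombres_unicos(mi_arreglo):
--     """
--     Recibe un arreglo de nombres y devuelve dos arreglos:
--     uno con los nombres únicos y otro con sus frecuencias.
--     """
--     arreglo = list(mi_arreglo)
--     vistos = set()
--     nombres_unicos = []
--     for nombre in arreglo:
--         if nombre not in vistos:
--             vistos.add(nombre)
--             nombres_unicos.append(nombre)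
--     frecuencias = [arreglo.count(n) for n in nombres_unicos]
--     return nombres_unicos, frecuencias
-- ===== Notes on version B (the rewrite author's own statement) =====
-- stated objective: alternative
-- what changed: Replaces the single-pass dict accumulation with collect-first-occurrences via a seen-set, then a second pass counting each unique name with list.count.
import Mathlib
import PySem

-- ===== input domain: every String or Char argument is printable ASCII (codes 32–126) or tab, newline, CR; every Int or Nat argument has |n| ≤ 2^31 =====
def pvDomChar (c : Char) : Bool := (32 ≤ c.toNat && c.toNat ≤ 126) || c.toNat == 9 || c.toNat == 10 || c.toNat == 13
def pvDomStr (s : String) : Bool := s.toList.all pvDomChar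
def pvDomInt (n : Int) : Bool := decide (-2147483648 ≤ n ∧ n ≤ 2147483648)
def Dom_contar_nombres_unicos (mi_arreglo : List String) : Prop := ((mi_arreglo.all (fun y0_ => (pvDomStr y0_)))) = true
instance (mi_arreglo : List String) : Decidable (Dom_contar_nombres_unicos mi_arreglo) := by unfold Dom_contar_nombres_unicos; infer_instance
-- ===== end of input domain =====

-- B collects the unique names with a seen-set in one pass and then counts each with a second pass,
-- instead of A's single dict-accumulation pass (objective: alternative decomposition).

-- ===== PORT A =====
-- one dict pass: frecuencia[nombre] += 1 / = 1, then keys and values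
def contar_nombres_unicos (mi_arreglo : List String) : List String × List Int :=
  let frecuencia : PySem.Dict String Int :=
    mi_arreglo.foldl
      (fun d nombre =>
        if d.contains nombre then d.insert nombre (d.getD nombre 0 + 1)
        else d.insert nombre 1)
      PySem.Dict.empty
  (frecuencia.keys, frecuencia.values)

-- ===== PORT B =====
-- first pass: seen-set + first-occurrence list; second pass: count each unique name
def contar_nombres_unicos_alt (mi_arreglo : List String) : List String × List Int :=
  let p :=
    mi_arreglo.foldl
      (fun (p : PySem.Set String × List String) nombre =>
        if PySem.Set.contains p.1 nombre then p
        else (PySem.Set.add p.1 nombre, p.2 ++ [nombre]))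
      (PySem.Set.empty, [])
  let nombres_unicos := p.2
  let frecuencias := nombres_unicos.map (fun n => (mi_arreglo.count n : Int))
  (nombres_unicos, frecuencias)

-- ===== PRECONDITION & SPEC =====
def Spec_contar_nombres_unicos (mi_arreglo : List String) (out : List String × List Int) : Prop := out = contar_nombres_unicos_alt mi_arreglo
instance (mi_arreglo : List String) (out : List String × List Int) : Decidable (Spec_contar_nombres_unicos mi_arreglo out) := by unfold Spec_contar_nombres_unicos; infer_instance

-- ===== CLAIM (what is proved, stated in full; the proofs are below) =====
def Claim_equal_contar_nombres_unicos : Prop := ∀ (mi_arreglo : List String), Dom_contar_nombres_unicos mi_arreglo → Spec_contar_nombres_unicos mi_arreglo (contar_nombres_unicos mi_arreglo)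

-- ===== LEMMAS AND PROOFS =====

-- A's loop body is 'insert n (getD n 0 + 1)' in both branches, so the fold is PySem.Dict.counter.
theorem pvA_dict_eq_counter (xs : List String) :
    xs.foldl
      (fun (d : PySem.Dict String Int) nombre =>
        if d.contains nombre then d.insert nombre (d.getD nombre 0 + 1)
        else d.insert nombre 1)
      PySem.Dict.empty = PySem.Dict.counter xs := by
  rw [← PySem.Dict.foldl_insert_getD_add_one_eq_counter]
  apply PySem.List.foldl_congr_mem
  intro d n _
  by_cases h : d.contains n
  · simp [h]
  · have h0 : d.getD n 0 = 0 := PySem.Dict.getD_of_not_contains d 0 (by simpa using h)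
    simp [h, h0]

-- B's pair fold keeps its two components equal, and each is the Set.add fold.
theorem pvB_pair_fold (xs : List String) (s : PySem.Set String) :
    xs.foldl
      (fun (p : PySem.Set String × List String) nombre =>
        if PySem.Set.contains p.1 nombre then p
        else (PySem.Set.add p.1 nombre, p.2 ++ [nombre]))
      (s, s) = (xs.foldl PySem.Set.add s, xs.foldl PySem.Set.add s) := by
  induction xs generalizing s with
  | nil => rfl
  | cons x xs ih =>
    simp only [List.foldl_cons]
    by_cases h : PySem.Set.contains s x
    · have hadd : PySem.Set.add s x = s := PySem.Set.add_of_mem ((PySem.Set.contains_iff _ _).mp h)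
      simp only [h, if_true, hadd]
      exact ih s
    · have hadd : PySem.Set.add s x = s ++ [x] :=
        PySem.Set.add_of_not_mem (fun hm => h ((PySem.Set.contains_iff _ _).mpr hm))
      simp only [h, Bool.false_eq_true, if_false, hadd]
      exact ih (s ++ [x])

-- ===== VERDICT (by name: the statement is the Claim_ definition above) =====
theorem contar_nombres_unicos_spec : Claim_equal_contar_nombres_unicos := by
  intro xs _
  show contar_nombres_unicos xs = contar_nombres_unicos_alt xs
  unfold contar_nombres_unicos contar_nombres_unicos_alt
  simp only [PySem.Set.empty]
  rw [pvA_dict_eq_counter, pvB_pair_fold xs ([] : PySem.Set String)]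
  rw [← PySem.Set.ofList_eq_foldl]
  simp only [PySem.Dict.keys, PySem.Dict.values, PySem.Dict.items_counter]
  simp [List.map_map, Function.comp_def]
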